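-- pv_equiv track=rewrite | github.com/PyotrIlyichTchaikovsky/fund_morning_star | hsbc_2_generate_isin.py | try_fix_table
-- ===== SOURCE A (Python) =====
-- def try_fix_table(table):
--     def split_row(row):
--         # 计算第一列拆分的行数
--         first_column = row[0]
--         if first_column is None:
--             return [row]
--         first_column_lines = first_column.split("\n")
--         num_lines = len(first_column_lines)
--         if num_lines <= 1:  # 本身就只有一列
--             return [row]
--
--         # 其他列按换行符拆分
--         new_rows = []
--         for i in range(num_lines):
--             new_row = []
--             for j, cell in enumerate(row):
--                 if cell is None:
--                     new_row.append("None")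
--                     continue
--                 cell_lines = cell.split("\n")
--                 if i < len(cell_lines):
--                     new_row.append(cell_lines[i])
--                 else:
--                     new_row.append(cell_lines[-1])  # 如果某一列的行数少于第一列，取最后一行的值
--             new_rows.append(new_row)
--         return new_rows
--
--     if not table or len(table) < 2:
--         return None
--
--     # 对整个表格进行拆分处理
--     new_table = [table[0]]  #表头
--     for row in table[1:]:
--         new_table.extend(split_row(row))
--
--     return new_table
-- ===== SOURCE B (Python) =====
-- def _pad_column(cell, n):
--     if cell is None:
--         return ["None"] * n
--     lines = cell.split("\n")
--     return (lines + [lines[-1]] * n)[:n]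
--
--
-- def _split_row(row):
--     first = row[0]
--     if first is None:
--         return [row]
--     n = len(first.split("\n"))
--     if n <= 1:
--         return [row]
--     columns = [_pad_column(cell, n) for cell in row]
--     return [list(t) for t in zip(*columns)]
--
--
-- def try_fix_table(table):
--     if not table or len(table) < 2:
--         return None
--     return [table[0]] + [new for row in table[1:] for new in _split_row(row)]
-- ===== Notes on version B (the rewrite author's own statement) =====
-- stated objective: alternative
-- what changed: Instead of indexing every cell per output line inside nested loops, B builds one padded/truncated column list per cell (pad by repeating the last line, truncate to the first column's line count) and transposes the columns with zip(*cols) to emit the new rows; the table pass becomes a flat comprehension instead of extend-in-a-loop.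
import Mathlib
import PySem

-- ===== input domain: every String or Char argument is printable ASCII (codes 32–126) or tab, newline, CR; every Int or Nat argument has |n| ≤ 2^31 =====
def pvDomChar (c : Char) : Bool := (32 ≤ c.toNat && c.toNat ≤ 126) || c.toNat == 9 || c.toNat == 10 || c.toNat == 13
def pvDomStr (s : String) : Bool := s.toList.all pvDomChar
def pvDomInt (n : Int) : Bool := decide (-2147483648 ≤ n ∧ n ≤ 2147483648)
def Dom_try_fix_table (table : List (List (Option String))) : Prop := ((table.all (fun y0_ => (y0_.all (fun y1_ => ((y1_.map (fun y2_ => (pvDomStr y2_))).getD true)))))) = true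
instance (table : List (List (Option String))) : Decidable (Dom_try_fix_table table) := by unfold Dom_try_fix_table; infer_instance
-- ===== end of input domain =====

-- B replaces A's per-output-line cell indexing by building one padded column per cell and
-- transposing the columns (zip) — an alternative decomposition, same cost.

-- s.split("\n"): the separator is nonempty so Python's split always succeeds (used by both Pythons)
def pvSplitNL (s : String) : List String := (PySem.Str.split? s "\n").getD []

-- ===== PORT A =====
def pvSplitRowA (row : List (Option String)) : List (List (Option String)) :=
  match PySem.List.pyGet? row 0 with
  | none => [row]          -- Python raises IndexError on row[0] here (empty row); excluded by Pre_
  | some none => [row]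
  | some (some fc) =>
    let lines := pvSplitNL fc
    let numLines := lines.length
    if numLines ≤ 1 then [row]
    else
      (List.range numLines).map (fun i =>
        row.map (fun cell =>
          match cell with
          | none => some "None"
          | some c =>
            let cl := pvSplitNL c
            if i < cl.length then some (cl.getD i "")
            else some (cl.getLastD "")))   -- cell_lines[-1]; split never returns [], so this is the last element

def try_fix_table (table : List (List (Option String))) : Option (List (List (Option String))) :=
  if table.length < 2 then none
  else match table with
    | [] => none   -- unreachable: length < 2 already caught []
    | h :: t => some (t.foldl (fun acc row => acc ++ pvSplitRowA row) [h])

-- ===== PORT B =====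
def pvPadCol (n : Nat) (cell : Option String) : List (Option String) :=
  match cell with
  | none => List.replicate n (some "None")
  | some c =>
    let ls := pvSplitNL c
    ((ls ++ List.replicate n (ls.getLastD "")).take n).map some   -- lines[-1]; split never returns []

-- zip(*cols): rows of heads until some column is exhausted
def pvZipAll {α : Type} : List (List α) → List (List α)
  | [] => []
  | c :: rest =>
    match h : (c :: rest).mapM List.head? with
    | none => []
    | some heads => heads :: pvZipAll (c.tail :: rest.map List.tail)
termination_by cols => (cols.headD []).length
decreasing_by
  simp only [List.headD_cons]
  cases c with
  | nil => simp [List.mapM_cons] at h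
  | cons x xs => simp

def pvSplitRowB (row : List (Option String)) : List (List (Option String)) :=
  match PySem.List.pyGet? row 0 with
  | none => [row]          -- Python raises IndexError on row[0] here (empty row); excluded by Pre_
  | some none => [row]
  | some (some fc) =>
    let n := (pvSplitNL fc).length
    if n ≤ 1 then [row]
    else pvZipAll (row.map (pvPadCol n))

def try_fix_table_alt (table : List (List (Option String))) : Option (List (List (Option String))) :=
  if table.length < 2 then none
  else match table with
    | [] => none
    | h :: t => some (h :: t.flatMap pvSplitRowB)

-- ===== PRECONDITION & SPEC =====
-- Pre_ excludes only inputs on which A raises IndexError: a data row that is the empty list.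
def Pre_try_fix_table (table : List (List (Option String))) : Prop :=
  ∀ row ∈ table.drop 1, row ≠ []
instance (table : List (List (Option String))) : Decidable (Pre_try_fix_table table) := by
  unfold Pre_try_fix_table; infer_instance

def pvWitness_try_fix_table : List (List (Option String)) :=
  [[some "h1", some "h2"], [some "a\nb", some "x"], [none, some "y\nz\nw"]]

def Spec_try_fix_table (table : List (List (Option String))) (out : Option (List (List (Option String)))) : Prop := out = try_fix_table_alt table
instance (table : List (List (Option String))) (out : Option (List (List (Option String)))) : Decidable (Spec_try_fix_table table out) := by unfold Spec_try_fix_table; infer_instance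

-- ===== CLAIM (what is proved, stated in full; the proofs are below) =====
def Claim_equal_try_fix_table : Prop := ∀ (table : List (List (Option String))), Dom_try_fix_table table → Pre_try_fix_table table → Spec_try_fix_table table (try_fix_table table)

-- ===== LEMMAS AND PROOFS =====

theorem pvMapM_head?_of_ne_nil {α : Type} (cols : List (List α)) (d : α)
    (h : ∀ c ∈ cols, c ≠ []) :
    cols.mapM List.head? = some (cols.map (fun c => c.getD 0 d)) := by
  induction cols with
  | nil => rfl
  | cons c rest ih =>
    cases c with
    | nil => exact absurd rfl (h [] (by simp))
    | cons x xs =>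
      simp only [List.mapM_cons, List.head?_cons, ih (fun c hc => h c (by simp [hc]))]
      simp

theorem pvZipAll_eq_range {α : Type} (d : α) (n : Nat) (cols : List (List α))
    (hne : cols ≠ []) (hlen : ∀ c ∈ cols, c.length = n) :
    pvZipAll cols = (List.range n).map (fun i => cols.map (fun c => c.getD i d)) := by
  induction n generalizing cols with
  | zero =>
    match cols, hne with
    | c :: rest, _ =>
      have hc : c = [] := List.eq_nil_of_length_eq_zero (hlen c (by simp))
      subst hc
      rw [pvZipAll]
      split
      · rfl
      · rename_i heads hh
        simp [List.mapM_cons] at hh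
  | succ n ih =>
    match cols, hne with
    | c :: rest, _ =>
      have hnn : ∀ x ∈ c :: rest, x ≠ [] := by
        intro x hx hx0; have := hlen x hx; simp [hx0] at this
      rw [pvZipAll]
      rw [pvMapM_head?_of_ne_nil (c :: rest) d hnn]
      have htails : (c.tail :: rest.map List.tail) = (c :: rest).map List.tail := by simp
      have hlen' : ∀ x ∈ (c :: rest).map List.tail, x.length = n := by
        intro x hx
        rcases List.mem_map.mp hx with ⟨y, hy, rfl⟩
        have := hlen y hy
        simp [List.length_tail, this]
      rw [htails, ih ((c :: rest).map List.tail) (by simp) hlen']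
      rw [List.range_succ_eq_map]
      simp only [List.map_cons, List.map_map]
      congr 1
      apply List.map_congr_left
      intro i _
      simp only [Function.comp]
      have hstep : ∀ x ∈ c :: rest, x.tail.getD i d = x.getD (i + 1) d := by
        intro x hx
        match x, hnn x hx with
        | y :: ys, _ => simp [List.getD]
      rw [hstep c (by simp)]
      congr 1
      apply List.map_congr_left
      intro x hx
      exact hstep x (by simp [hx])

theorem pvPadCol_length (n : Nat) (cell : Option String) : (pvPadCol n cell).length = n := by
  cases cell with
  | none => simp [pvPadCol]
  | some c => simp [pvPadCol]

theorem pvPadCol_getD (n : Nat) (i : Nat) (hi : i < n) (cell : Option String) :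
    (pvPadCol n cell).getD i none =
      (match cell with
       | none => some "None"
       | some c =>
         let cl := pvSplitNL c
         if i < cl.length then some (cl.getD i "")
         else some (cl.getLastD "")) := by
  cases cell with
  | none => simp [pvPadCol, List.getD, hi]
  | some c =>
    simp only [pvPadCol, List.getD, List.getElem?_map]
    by_cases h : i < (pvSplitNL c).length
    · simp [hi, h]
    · have hrep : i - (pvSplitNL c).length < n := by omega
      have hlt : i < (pvSplitNL c ++ List.replicate n ((pvSplitNL c).getLastD "")).length := by
        simp; omega
      simp only [List.getElem?_take, hi, if_true, List.getElem?_eq_getElem hlt, Option.map_some,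
        Option.getD_some]
      rw [List.getElem_append_right (by omega)]
      simp [h]

theorem pvSplitRow_eq (row : List (Option String)) : pvSplitRowA row = pvSplitRowB row := by
  unfold pvSplitRowA pvSplitRowB
  cases hg : PySem.List.pyGet? row 0 with
  | none => rfl
  | some fc =>
    cases fc with
    | none => rfl
    | some s =>
      simp only
      by_cases hn : (pvSplitNL s).length ≤ 1
      · simp [hn]
      · simp only [hn, if_false]
        have hrow : row ≠ [] := by
          intro h; subst h; simp [PySem.List.pyGet?, PySem.List.pyIdx?] at hg
        rw [pvZipAll_eq_range (none : Option String) (pvSplitNL s).length (row.map (pvPadCol (pvSplitNL s).length))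
              (by simpa using hrow)
              (by intro c hc; rcases List.mem_map.mp hc with ⟨y, _, rfl⟩; exact pvPadCol_length _ y)]
        apply List.map_congr_left
        intro i hi
        rw [List.mem_range] at hi
        rw [List.map_map]
        apply List.map_congr_left
        intro cell _
        simp only [Function.comp]
        rw [pvPadCol_getD _ _ hi]

theorem pvFoldl_flatMap (t : List (List (Option String))) :
    ∀ (acc : List (List (Option String))),
      t.foldl (fun acc row => acc ++ pvSplitRowA row) acc = acc ++ t.flatMap pvSplitRowB := by
  induction t with
  | nil => intro acc; simp
  | cons r rs ih =>
    intro acc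
    rw [List.foldl_cons, List.flatMap_cons, ih, pvSplitRow_eq]
    simp [List.append_assoc]

theorem pvTable_eq (table : List (List (Option String))) :
    try_fix_table table = try_fix_table_alt table := by
  unfold try_fix_table try_fix_table_alt
  by_cases h2 : table.length < 2
  · simp [h2]
  · cases table with
    | nil => simp at h2
    | cons h t =>
      simp only [h2, if_false]
      congr 1
      simpa using pvFoldl_flatMap t [h]

-- ===== VERDICT (by name: the statement is the Claim_ definition above) =====
theorem try_fix_table_spec : Claim_equal_try_fix_table := by
  intro table _ _
  unfold Spec_try_fix_table
  exact pvTable_eq table
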